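-- pv_equiv track=rewrite | github.com/fairrepair/fair-repair | patch.py | accuracyCalculator
-- ===== SOURCE A (Python) =====
-- def accuracyCalculator(lst1,lst2,cls1,cls2,dataList):
--     '''
--     This function computes the true/false positives/negatives given the predicted outcome and the actual outcome.
--     '''
--
--     true_pos = 0
--     false_pos = 0
--     true_neg = 0
--     false_neg = 0
--
--     for i in range(len(lst1)):
--         if lst1[i] == cls2:
--             if lst2[i] == cls2:
--                 true_pos += dataList[i]['frequency']
--             if lst2[i] == cls1:
--                 false_pos += dataList[i]['frequency']
--         if lst1[i] == cls1:
--             if lst2[i] == cls2: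
--                 false_neg += dataList[i]['frequency']
--             if lst2[i] == cls1:
--                 true_neg += dataList[i]['frequency']
--     return true_pos, false_pos, true_neg, false_neg
-- ===== SOURCE B (Python) =====
-- def _wsum(p, a, rows):
--     '''Weighted count of rows predicted p with actual a.'''
--     return sum(d['frequency'] for x, y, d in rows if x == p and y == a)
--
-- def accuracyCalculator(lst1, lst2, cls1, cls2, dataList):
--     '''
--     Staged re-implementation: materialise the (predicted, actual, record)
--     rows once, then compute each of the four counts as an independent
--     filtered weighted sum over those rows.
--     '''
--     rows = list(zip(lst1, lst2, dataList))
--     return (_wsum(cls2, cls2, rows), _wsum(cls2, cls1, rows),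
--             _wsum(cls1, cls1, rows), _wsum(cls1, cls2, rows))
-- ===== Notes on version B (the rewrite author's own statement) =====
-- stated objective: alternative
-- what changed: A's single indexed loop with four accumulators and nested branches is replaced by zipping the three lists once and computing each of the four counts as an independent filtered weighted sum (four staged passes, no running accumulators or branches).
import Mathlib
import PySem

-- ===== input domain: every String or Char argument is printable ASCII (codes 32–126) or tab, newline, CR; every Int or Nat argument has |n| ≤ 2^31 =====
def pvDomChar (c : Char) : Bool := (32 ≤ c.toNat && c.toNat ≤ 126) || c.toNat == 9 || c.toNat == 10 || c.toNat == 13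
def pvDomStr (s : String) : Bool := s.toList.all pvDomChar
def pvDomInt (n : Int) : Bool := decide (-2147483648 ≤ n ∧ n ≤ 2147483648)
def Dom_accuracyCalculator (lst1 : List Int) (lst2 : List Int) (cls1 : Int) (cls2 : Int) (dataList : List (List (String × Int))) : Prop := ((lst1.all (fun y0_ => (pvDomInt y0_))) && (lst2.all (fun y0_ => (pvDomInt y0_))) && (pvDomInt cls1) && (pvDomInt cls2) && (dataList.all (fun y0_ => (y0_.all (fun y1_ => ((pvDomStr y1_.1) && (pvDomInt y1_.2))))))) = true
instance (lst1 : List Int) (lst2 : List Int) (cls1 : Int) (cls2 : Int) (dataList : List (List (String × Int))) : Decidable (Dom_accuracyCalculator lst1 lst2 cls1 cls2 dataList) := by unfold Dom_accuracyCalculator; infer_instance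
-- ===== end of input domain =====

-- B replaces A's single indexed loop with four accumulators by zipping the three lists once
-- and computing each of the four counts as an independent filtered weighted sum (alternative
-- decomposition, same cost). Proved equal on every input where A returns (Pre_ excludes
-- exactly A's IndexError/KeyError inputs).

-- ===== PORT A =====
-- shorthand for dataList[i]['frequency'] (exact under Pre_: index in range, key present wherever accessed)
def pvFreq (dataList : List (List (String × Int))) (i : Int) : Int :=
  PySem.Dict.getD (PySem.Dict.mk (PySem.List.pyGetD dataList i [])) "frequency" 0

-- loop body of A, one index step: the four nested ifs, state (true_pos, false_pos, true_neg, false_neg)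
def pvStepA (lst1 : List Int) (lst2 : List Int) (cls1 : Int) (cls2 : Int)
    (dataList : List (List (String × Int))) (s : Int × Int × Int × Int) (i : Int) :
    Int × Int × Int × Int :=
  ( (if PySem.List.pyGetD lst1 i 0 = cls2 then
       (if PySem.List.pyGetD lst2 i 0 = cls2 then s.1 + pvFreq dataList i else s.1) else s.1),
    (if PySem.List.pyGetD lst1 i 0 = cls2 then
       (if PySem.List.pyGetD lst2 i 0 = cls1 then s.2.1 + pvFreq dataList i else s.2.1) else s.2.1),
    (if PySem.List.pyGetD lst1 i 0 = cls1 then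
       (if PySem.List.pyGetD lst2 i 0 = cls1 then s.2.2.1 + pvFreq dataList i else s.2.2.1) else s.2.2.1),
    (if PySem.List.pyGetD lst1 i 0 = cls1 then
       (if PySem.List.pyGetD lst2 i 0 = cls2 then s.2.2.2 + pvFreq dataList i else s.2.2.2) else s.2.2.2) )

def accuracyCalculator (lst1 : List Int) (lst2 : List Int) (cls1 : Int) (cls2 : Int) (dataList : List (List (String × Int))) : Int × Int × Int × Int :=
  (PySem.List.pyRange 0 (lst1.length : Int) 1).foldl
    (pvStepA lst1 lst2 cls1 cls2 dataList) (0, 0, 0, 0)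

-- ===== PORT B =====
-- d['frequency'] of one row's record (exact under Pre_: key present wherever B's generator accesses it)
def pvRowFreq (d : List (String × Int)) : Int :=
  PySem.Dict.getD (PySem.Dict.mk d) "frequency" 0

-- _wsum(p, a, rows) = sum of d['frequency'] over the rows with predicted p and actual a
def pvWSum (p a : Int) (rows : List (Int × Int × List (String × Int))) : Int :=
  ((rows.filter (fun r => r.1 == p && r.2.1 == a)).map (fun r => pvRowFreq r.2.2)).foldl (· + ·) 0

def accuracyCalculator_alt (lst1 : List Int) (lst2 : List Int) (cls1 : Int) (cls2 : Int) (dataList : List (List (String × Int))) : Int × Int × Int × Int :=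
  let rows := lst1.zip (lst2.zip dataList)
  (pvWSum cls2 cls2 rows, pvWSum cls2 cls1 rows,
   pvWSum cls1 cls1 rows, pvWSum cls1 cls2 rows)

-- ===== PRECONDITION & SPEC =====
-- Pre_ excludes exactly the inputs where Python A raises: an index i with lst1[i] among the
-- two classes but i out of range for lst2 (IndexError), or additionally lst2[i] among the two
-- classes but i out of range for dataList or dataList[i] lacking key 'frequency' (KeyError).
def Pre_accuracyCalculator (lst1 : List Int) (lst2 : List Int) (cls1 : Int) (cls2 : Int) (dataList : List (List (String × Int))) : Prop :=
  ∀ i : Nat, i < lst1.length →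
    (lst1.getD i 0 = cls2 ∨ lst1.getD i 0 = cls1) →
    i < lst2.length ∧
      ((lst2.getD i 0 = cls2 ∨ lst2.getD i 0 = cls1) →
        i < dataList.length ∧
          (PySem.Dict.mk (dataList.getD i [])).contains "frequency" = true)
instance (lst1 : List Int) (lst2 : List Int) (cls1 : Int) (cls2 : Int) (dataList : List (List (String × Int))) : Decidable (Pre_accuracyCalculator lst1 lst2 cls1 cls2 dataList) := by unfold Pre_accuracyCalculator; infer_instance

def pvWitness_accuracyCalculator : List Int × List Int × Int × Int × (List (List (String × Int))) :=
  ([1, 2], [2, 2], 1, 2, [[("frequency", 3)], [("frequency", 5)]])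

def Spec_accuracyCalculator (lst1 : List Int) (lst2 : List Int) (cls1 : Int) (cls2 : Int) (dataList : List (List (String × Int))) (out : Int × Int × Int × Int) : Prop := out = accuracyCalculator_alt lst1 lst2 cls1 cls2 dataList
instance (lst1 : List Int) (lst2 : List Int) (cls1 : Int) (cls2 : Int) (dataList : List (List (String × Int))) (out : Int × Int × Int × Int) : Decidable (Spec_accuracyCalculator lst1 lst2 cls1 cls2 dataList out) := by unfold Spec_accuracyCalculator; infer_instance

-- ===== CLAIM =====
def Claim_equal_accuracyCalculator : Prop := ∀ (lst1 : List Int) (lst2 : List Int) (cls1 : Int) (cls2 : Int) (dataList : List (List (String × Int))), Dom_accuracyCalculator lst1 lst2 cls1 cls2 dataList → Pre_accuracyCalculator lst1 lst2 cls1 cls2 dataList → Spec_accuracyCalculator lst1 lst2 cls1 cls2 dataList (accuracyCalculator lst1 lst2 cls1 cls2 dataList)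

-- ===== LEMMAS AND PROOFS =====

-- Appending one row to a weighted sum adds its frequency exactly when it matches the filter.
theorem pvWSum_append_singleton (p a : Int) (rows : List (Int × Int × List (String × Int)))
    (r : Int × Int × List (String × Int)) :
    pvWSum p a (rows ++ [r]) =
      pvWSum p a rows + (if r.1 = p ∧ r.2.1 = a then pvRowFreq r.2.2 else 0) := by
  unfold pvWSum
  by_cases h : r.1 = p ∧ r.2.1 = a
  · simp [List.filter_append, h]
  · simp only [List.filter_append]
    rw [List.filter_singleton]
    have : (r.1 == p && r.2.1 == a) = false := by
      simp only [Bool.and_eq_false_iff, beq_eq_false_iff_ne]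
      tauto
    simp [this, h]

-- The main invariant: A's fold over the first n indices equals B's four staged sums over the first n rows.
theorem pvMain (lst1 lst2 : List Int) (cls1 cls2 : Int)
    (dataList : List (List (String × Int)))
    (hpre : Pre_accuracyCalculator lst1 lst2 cls1 cls2 dataList) :
    ∀ n : Nat, n ≤ lst1.length →
      (PySem.List.pyRange 0 (n : Int) 1).foldl (pvStepA lst1 lst2 cls1 cls2 dataList) (0, 0, 0, 0) =
        ( pvWSum cls2 cls2 ((lst1.zip (lst2.zip dataList)).take n),
          pvWSum cls2 cls1 ((lst1.zip (lst2.zip dataList)).take n),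
          pvWSum cls1 cls1 ((lst1.zip (lst2.zip dataList)).take n),
          pvWSum cls1 cls2 ((lst1.zip (lst2.zip dataList)).take n) ) := by
  intro n
  induction n with
  | zero =>
    intro _
    simp [PySem.List.pyRange_one_eq_nil, pvWSum]
  | succ n ih =>
    intro hn
    have hn' : n ≤ lst1.length := Nat.le_of_succ_le hn
    have hcast : ((n + 1 : Nat) : Int) = (n : Int) + 1 := by push_cast; ring
    rw [hcast, PySem.List.pyRange_one_succ_right (by positivity), List.foldl_append, ih hn']
    simp only [List.foldl_cons, List.foldl_nil]
    set rows := lst1.zip (lst2.zip dataList) with hrows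
    have hlen : rows.length = min lst1.length (min lst2.length dataList.length) := by
      simp [hrows]
    by_cases hin : n < rows.length
    · -- in-range step: rows.take (n+1) = rows.take n ++ [rows[n]]
      have htake : rows.take (n + 1) = rows.take n ++ [rows[n]] := by
        rw [List.take_add_one]; simp [hin]
      have h1 : n < lst1.length := by omega
      have h2 : n < lst2.length := by rw [hlen] at hin; omega
      have h3 : n < dataList.length := by rw [hlen] at hin; omega
      have hr : rows[n] = (lst1[n], lst2[n], dataList[n]) := by
        simp [hrows]
      have g1 : PySem.List.pyGetD lst1 (n : Int) 0 = lst1[n] := by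
        simp [PySem.List.pyGetD_natCast, h1]
      have g2 : PySem.List.pyGetD lst2 (n : Int) 0 = lst2[n] := by
        simp [PySem.List.pyGetD_natCast, h2]
      have gf : pvFreq dataList (n : Int) = pvRowFreq dataList[n] := by
        simp [pvFreq, pvRowFreq, PySem.List.pyGetD_natCast, h3]
      rw [htake]
      refine Prod.ext ?_ (Prod.ext ?_ (Prod.ext ?_ ?_)) <;>
        · dsimp only [pvStepA]
          rw [pvWSum_append_singleton, hr, g1, g2, gf]
          dsimp only
          split_ifs <;> simp_all
    · -- out-of-range step: Pre_ forces the step to be a no-op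
      have htake : rows.take (n + 1) = rows.take n := by
        rw [List.take_of_length_le (by omega), List.take_of_length_le (by omega)]
      have h1 : n < lst1.length := by omega
      have g1 : PySem.List.pyGetD lst1 (n : Int) 0 = lst1.getD n 0 := by
        simp [PySem.List.pyGetD_natCast]
      have g2 : PySem.List.pyGetD lst2 (n : Int) 0 = lst2.getD n 0 := by
        simp [PySem.List.pyGetD_natCast]
      have hpre' := hpre n h1
      have hid : ∀ s : Int × Int × Int × Int,
          pvStepA lst1 lst2 cls1 cls2 dataList s (n : Int) = s := by
        intro s
        by_cases hm1 : lst1.getD n 0 = cls2 ∨ lst1.getD n 0 = cls1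
        · obtain ⟨hl2, hrest⟩ := hpre' hm1
          by_cases hm2 : lst2.getD n 0 = cls2 ∨ lst2.getD n 0 = cls1
          · obtain ⟨hld, -⟩ := hrest hm2
            rw [hlen] at hin; omega
          · push_neg at hm2
            dsimp only [pvStepA]
            rw [g1, g2]
            simp [← List.getD_eq_getElem?_getD, hm2.1, hm2.2]
        · push_neg at hm1
          dsimp only [pvStepA]
          rw [g1]
          simp [← List.getD_eq_getElem?_getD, hm1.1, hm1.2]
      rw [htake, hid]

-- ===== VERDICT =====
theorem accuracyCalculator_spec : Claim_equal_accuracyCalculator := by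
  intro lst1 lst2 cls1 cls2 dataList _ hpre
  unfold Spec_accuracyCalculator accuracyCalculator accuracyCalculator_alt
  rw [pvMain lst1 lst2 cls1 cls2 dataList hpre lst1.length le_rfl]
  have : (lst1.zip (lst2.zip dataList)).take lst1.length = lst1.zip (lst2.zip dataList) := by
    apply List.take_of_length_le
    simp
  rw [this]
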